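-- pv_equiv track=rewrite | github.com/gosch/Katas-in-python | 2018/july/reta_generadores.py | robotWalk
-- ===== SOURCE A (Python) =====
-- def robotWalk(a):
--     positions = {}
--     x = 0
--     y = 0
--     direction = 0
--     positions[0, 0] = True
--     for i in a:
--         if i == 0:
--             return True
--         if direction % 4 == 0:
--             for j in range(1, i + 1):
--                 if (x, y + j) in positions:
--                     return True
--                 else:
--                     positions[(x, y + j)] = True
--             y += i
--         if direction % 4 == 1:
--             for j in range(1, i + 1):
--                 if (x + j, y) in positions:
--                     return True
--                 else:
--                     positions[(x + j, y)] = True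
--             x += i
--
--         if direction % 4 == 2:
--             for j in range(1, i + 1):
--                 if (x, y - j) in positions:
--                     return True
--                 else:
--                     positions[(x, y - j)] = True
--             y -= i
--
--         if direction % 4 == 3:
--             for j in range(1, i + 1):
--                 if (x - j, y) in positions:
--                     return True
--                 else:
--                     positions[(x - j, y)] = True
--             x -= i
--         direction += 1
--     return False
-- ===== SOURCE B (Python) =====
-- def robotWalk(a):
--     # Segment-based: each positive move is an axis-aligned segment; a self-crossing is a
--     # segment/segment overlap, tested against all prior segments (O(n^2) in moves, not in distance).
--     def overlap(s, t):
--         o1, c1, lo1, hi1 = s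
--         o2, c2, lo2, hi2 = t
--         if o1 == o2:
--             return c1 == c2 and max(lo1, lo2) <= min(hi1, hi2)
--         # perpendicular: s runs along its axis at coordinate c1, t at c2
--         return lo2 <= c1 <= hi2 and lo1 <= c2 <= hi1
--
--     x = y = 0
--     d = 0
--     segs = [('V', 0, 0, 0)]  # the starting cell as a degenerate segment
--     for i in a:
--         if i == 0:
--             return True
--         if i > 0:
--             if d == 0:
--                 new = ('V', x, y + 1, y + i)
--             elif d == 1:
--                 new = ('H', y, x + 1, x + i)
--             elif d == 2:
--                 new = ('V', x, y - i, y - 1)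
--             else:
--                 new = ('H', y, x - i, x - 1)
--             if any(overlap(new, s) for s in segs):
--                 return True
--             segs.append(new)
--         if d == 0:
--             y += i
--         elif d == 1:
--             x += i
--         elif d == 2:
--             y -= i
--         else:
--             x -= i
--         d = (d + 1) % 4
--     return False
-- ===== Notes on version B (the rewrite author's own statement) =====
-- stated objective: faster
-- what changed: B replaces A's cell-by-cell simulation (a dict entry and a membership test per unit of distance walked) with one axis-aligned segment per move, testing each new segment for overlap against all prior segments, so cost depends on the number of moves, not the distances.
import Mathlib
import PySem

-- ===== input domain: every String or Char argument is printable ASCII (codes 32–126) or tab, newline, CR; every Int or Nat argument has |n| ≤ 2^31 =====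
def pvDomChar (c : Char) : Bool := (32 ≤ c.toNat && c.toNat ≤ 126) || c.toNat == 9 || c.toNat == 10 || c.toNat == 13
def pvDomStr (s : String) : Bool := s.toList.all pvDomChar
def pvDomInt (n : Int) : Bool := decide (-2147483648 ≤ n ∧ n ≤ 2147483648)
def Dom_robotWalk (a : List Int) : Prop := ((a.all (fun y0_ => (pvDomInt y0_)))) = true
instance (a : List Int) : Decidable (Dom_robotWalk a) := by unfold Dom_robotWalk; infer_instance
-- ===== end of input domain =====

-- B replaces A's cell-by-cell walk (O(total distance), dict of visited cells) by per-move
-- axis-aligned segments tested for overlap against all prior segments (O(moves^2)).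

-- ===== PORT A =====
-- inner 'for j in range(...)' loop: none = the early 'return True', some = updated dict
def innerA (cell : Int → Int × Int) :
    List Int → Std.HashMap (Int × Int) Bool → Option (Std.HashMap (Int × Int) Bool)
  | [], pos => some pos
  | j :: js, pos =>
    if pos.contains (cell j) then none
    else innerA cell js (pos.insert (cell j) true)

def goA : List Int → Std.HashMap (Int × Int) Bool → Int → Int → Int → Bool
  | [], _, _, _, _ => false
  | i :: rest, pos, x, y, dir =>
    if i = 0 then true
    else if PySem.Int.mod dir 4 = 0 then
      match innerA (fun j => (x, y + j)) (PySem.List.pyRange 1 (i+1) 1) pos with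
      | none => true
      | some pos' => goA rest pos' x (y + i) (dir + 1)
    else if PySem.Int.mod dir 4 = 1 then
      match innerA (fun j => (x + j, y)) (PySem.List.pyRange 1 (i+1) 1) pos with
      | none => true
      | some pos' => goA rest pos' (x + i) y (dir + 1)
    else if PySem.Int.mod dir 4 = 2 then
      match innerA (fun j => (x, y - j)) (PySem.List.pyRange 1 (i+1) 1) pos with
      | none => true
      | some pos' => goA rest pos' x (y - i) (dir + 1)
    else
      match innerA (fun j => (x - j, y)) (PySem.List.pyRange 1 (i+1) 1) pos with
      | none => true
      | some pos' => goA rest pos' (x - i) y (dir + 1)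

def robotWalk (a : List Int) : Bool :=
  goA a ((∅ : Std.HashMap (Int × Int) Bool).insert ((0 : Int), (0 : Int)) true) 0 0 0

-- ===== PORT B =====
inductive Seg
  | V : Int → Int → Int → Seg   -- vertical: x, ylo, yhi
  | H : Int → Int → Int → Seg   -- horizontal: y, xlo, xhi
deriving DecidableEq, Repr

def overlapB : Seg → Seg → Bool
  | .V c1 lo1 hi1, .V c2 lo2 hi2 => c1 == c2 && decide (max lo1 lo2 ≤ min hi1 hi2)
  | .H c1 lo1 hi1, .H c2 lo2 hi2 => c1 == c2 && decide (max lo1 lo2 ≤ min hi1 hi2)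
  | .V c1 lo1 hi1, .H c2 lo2 hi2 => decide (lo2 ≤ c1 ∧ c1 ≤ hi2 ∧ lo1 ≤ c2 ∧ c2 ≤ hi1)
  | .H c1 lo1 hi1, .V c2 lo2 hi2 => decide (lo2 ≤ c1 ∧ c1 ≤ hi2 ∧ lo1 ≤ c2 ∧ c2 ≤ hi1)

def goB : List Int → List Seg → Int → Int → Int → Bool
  | [], _, _, _, _ => false
  | i :: rest, segs, x, y, d =>
    if i = 0 then true
    else
      match (if 0 < i then
               (let new := if d = 0 then Seg.V x (y+1) (y+i)
                           else if d = 1 then Seg.H y (x+1) (x+i)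
                           else if d = 2 then Seg.V x (y-i) (y-1)
                           else Seg.H y (x-i) (x-1)
                if segs.any (fun s => overlapB new s) then none else some (segs ++ [new]))
             else some segs) with
      | none => true
      | some segs' =>
        if d = 0 then goB rest segs' x (y + i) (PySem.Int.mod (d+1) 4)
        else if d = 1 then goB rest segs' (x + i) y (PySem.Int.mod (d+1) 4)
        else if d = 2 then goB rest segs' x (y - i) (PySem.Int.mod (d+1) 4)
        else goB rest segs' (x - i) y (PySem.Int.mod (d+1) 4)

def robotWalk_alt (a : List Int) : Bool :=
  goB a [Seg.V 0 0 0] 0 0 0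

-- ===== PRECONDITION & SPEC =====
def Spec_robotWalk (a : List Int) (out : Bool) : Prop := out = robotWalk_alt a
instance (a : List Int) (out : Bool) : Decidable (Spec_robotWalk a out) := by unfold Spec_robotWalk; infer_instance

-- ===== CLAIM (what is proved, stated in full; the proofs are below) =====
def Claim_equal_robotWalk : Prop := ∀ (a : List Int), Dom_robotWalk a → Spec_robotWalk a (robotWalk a)

-- ===== LEMMAS AND PROOFS =====

def segMemB : Seg → Int × Int → Bool
  | .V c lo hi, p => p.1 == c && decide (lo ≤ p.2 ∧ p.2 ≤ hi)
  | .H c lo hi, p => p.2 == c && decide (lo ≤ p.1 ∧ p.1 ≤ hi)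

theorem overlapB_iff (s t : Seg) :
    overlapB s t = true ↔ ∃ p, segMemB s p = true ∧ segMemB t p = true := by
  cases s with
  | V c1 lo1 hi1 =>
    cases t with
    | V c2 lo2 hi2 =>
      simp only [overlapB]
      constructor
      · intro h
        simp only [Bool.and_eq_true, beq_iff_eq, decide_eq_true_eq] at h
        refine ⟨(c1, max lo1 lo2), ?_, ?_⟩ <;>
          simp only [segMemB, Bool.and_eq_true, beq_iff_eq, decide_eq_true_eq]
        · exact ⟨by trivial, by omega⟩
        · exact ⟨h.1, by omega⟩
      · rintro ⟨⟨p1, p2⟩, h1, h2⟩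
        simp only [segMemB, Bool.and_eq_true, beq_iff_eq, decide_eq_true_eq] at h1 h2 ⊢
        omega
    | H c2 lo2 hi2 =>
      simp only [overlapB]
      constructor
      · intro h
        simp only [decide_eq_true_eq] at h
        refine ⟨(c1, c2), ?_, ?_⟩ <;>
          simp only [segMemB, Bool.and_eq_true, beq_iff_eq, decide_eq_true_eq]
        · exact ⟨by trivial, by omega⟩
        · exact ⟨by trivial, by omega⟩
      · rintro ⟨⟨p1, p2⟩, h1, h2⟩
        simp only [segMemB, Bool.and_eq_true, beq_iff_eq, decide_eq_true_eq] at h1 h2 ⊢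
        omega
  | H c1 lo1 hi1 =>
    cases t with
    | V c2 lo2 hi2 =>
      simp only [overlapB]
      constructor
      · intro h
        simp only [decide_eq_true_eq] at h
        refine ⟨(c2, c1), ?_, ?_⟩ <;>
          simp only [segMemB, Bool.and_eq_true, beq_iff_eq, decide_eq_true_eq]
        · exact ⟨by trivial, by omega⟩
        · exact ⟨by trivial, by omega⟩
      · rintro ⟨⟨p1, p2⟩, h1, h2⟩
        simp only [segMemB, Bool.and_eq_true, beq_iff_eq, decide_eq_true_eq] at h1 h2 ⊢
        omega
    | H c2 lo2 hi2 =>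
      simp only [overlapB]
      constructor
      · intro h
        simp only [Bool.and_eq_true, beq_iff_eq, decide_eq_true_eq] at h
        refine ⟨(max lo1 lo2, c1), ?_, ?_⟩ <;>
          simp only [segMemB, Bool.and_eq_true, beq_iff_eq, decide_eq_true_eq]
        · exact ⟨by trivial, by omega⟩
        · exact ⟨h.1, by omega⟩
      · rintro ⟨⟨p1, p2⟩, h1, h2⟩
        simp only [segMemB, Bool.and_eq_true, beq_iff_eq, decide_eq_true_eq] at h1 h2 ⊢
        omega

def DictInv (pos : Std.HashMap (Int × Int) Bool) (segs : List Seg) : Prop :=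
  ∀ p, pos.contains p = segs.any (fun s => segMemB s p)

theorem innerA_none_iff (cell : Int → Int × Int) (hinj : Function.Injective cell)
    (js : List Int) (hnd : js.Nodup) (pos : Std.HashMap (Int × Int) Bool) :
    innerA cell js pos = none ↔ ∃ j ∈ js, pos.contains (cell j) = true := by
  induction js generalizing pos with
  | nil => simp [innerA]
  | cons j js ih =>
    simp only [innerA]
    by_cases h : pos.contains (cell j) = true
    · rw [if_pos h]
      exact ⟨fun _ => ⟨j, List.mem_cons_self .., h⟩, fun _ => rfl⟩
    · rw [if_neg h]
      have hnd' := hnd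
      simp only [List.nodup_cons] at hnd'
      rw [ih hnd'.2]
      constructor
      · rintro ⟨j', hj', hc⟩
        rw [Std.HashMap.contains_insert] at hc
        have : cell j' ≠ cell j := fun he => hnd'.1 (hinj he ▸ hj')
        rcases Bool.or_eq_true_iff.mp hc with h1 | h2
        · exact absurd (beq_iff_eq.mp h1).symm this
        · exact ⟨j', List.mem_cons_of_mem _ hj', h2⟩
      · rintro ⟨j', hj', hc⟩
        rcases List.mem_cons.mp hj' with rfl | hm
        · exact absurd hc h
        · refine ⟨j', hm, ?_⟩
          rw [Std.HashMap.contains_insert, hc, Bool.or_true]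

theorem innerA_some (cell : Int → Int × Int) (js : List Int)
    (pos pos' : Std.HashMap (Int × Int) Bool)
    (h : innerA cell js pos = some pos') :
    ∀ p, pos'.contains p = (pos.contains p || js.any (fun j => cell j == p)) := by
  induction js generalizing pos with
  | nil => simp only [innerA, Option.some.injEq] at h; simp [← h]
  | cons j js ih =>
    simp only [innerA] at h
    by_cases hc : pos.contains (cell j) = true
    · simp [hc] at h
    · rw [if_neg hc] at h
      intro p
      rw [ih _ h p, Std.HashMap.contains_insert]
      simp only [List.any_cons]
      cases hcell : (cell j == p) <;> cases hpos : pos.contains p <;>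
        simp_all

-- the per-move bridge, shared by the four directions
theorem step_equiv (pos : Std.HashMap (Int × Int) Bool) (segs : List Seg)
    (cell : Int → Int × Int) (new : Seg) (i : Int)
    (hInv : DictInv pos segs) (_hi : 0 < i) (hinj : Function.Injective cell)
    (hpts : ∀ p, segMemB new p = true ↔ ∃ j, 1 ≤ j ∧ j ≤ i ∧ p = cell j) :
    ((innerA cell (PySem.List.pyRange 1 (i+1) 1) pos = none) ↔
        segs.any (fun s => overlapB new s) = true)
    ∧ ∀ pos', innerA cell (PySem.List.pyRange 1 (i+1) 1) pos = some pos' →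
        DictInv pos' (segs ++ [new]) := by
  constructor
  · rw [innerA_none_iff cell hinj _ (PySem.List.nodup_pyRange_one 1 (i+1)) pos]
    constructor
    · rintro ⟨j, hj, hc⟩
      rw [PySem.List.mem_pyRange_one] at hj
      rw [hInv, List.any_eq_true] at hc
      rcases hc with ⟨s, hs, hm⟩
      rw [List.any_eq_true]
      refine ⟨s, hs, (overlapB_iff new s).mpr ⟨cell j, (hpts _).mpr ⟨j, by omega, by omega, rfl⟩, hm⟩⟩
    · intro h
      rw [List.any_eq_true] at h
      rcases h with ⟨s, hs, ho⟩
      rcases (overlapB_iff new s).mp ho with ⟨p, hpn, hps⟩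
      rcases (hpts p).mp hpn with ⟨j, h1, h2, rfl⟩
      refine ⟨j, PySem.List.mem_pyRange_one.mpr ⟨by omega, by omega⟩, ?_⟩
      rw [hInv, List.any_eq_true]; exact ⟨s, hs, hps⟩
  · intro pos' h p
    rw [innerA_some cell _ pos pos' h p, hInv, List.any_append, List.any_cons, List.any_nil,
      Bool.or_false]
    congr 1
    rw [Bool.eq_iff_iff, List.any_eq_true]
    constructor
    · rintro ⟨j, hj, he⟩
      rw [PySem.List.mem_pyRange_one] at hj
      exact (hpts p).mpr ⟨j, by omega, by omega, (beq_iff_eq.mp he).symm⟩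
    · intro hb
      rcases (hpts p).mp hb with ⟨j, h1, h2, rfl⟩
      exact ⟨j, PySem.List.mem_pyRange_one.mpr ⟨by omega, by omega⟩, beq_iff_eq.mpr rfl⟩

theorem mod4_succ (dir : Int) :
    PySem.Int.mod (dir + 1) 4 = PySem.Int.mod (PySem.Int.mod dir 4 + 1) 4 := by
  simp only [PySem.Int.mod_eq_emod_of_pos (show (0:Int) < 4 by norm_num)]
  omega

theorem goA_eq_goB (a : List Int) (pos : Std.HashMap (Int × Int) Bool) (segs : List Seg)
    (x y dir : Int) (hInv : DictInv pos segs) :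
    goA a pos x y dir = goB a segs x y (PySem.Int.mod dir 4) := by
  induction a generalizing pos segs x y dir with
  | nil => simp [goA, goB]
  | cons i rest ih =>
    have hdr : 0 ≤ PySem.Int.mod dir 4 := PySem.Int.mod_nonneg dir (by norm_num)
    have hdl : PySem.Int.mod dir 4 < 4 := PySem.Int.mod_lt dir (by norm_num)
    simp only [goA, goB]
    by_cases hz : i = 0
    · simp [hz]
    rw [if_neg hz, if_neg hz]
    by_cases hneg : i < 0
    · -- empty range: A's inner loop is a no-op, B skips the check
      have hrange : PySem.List.pyRange 1 (i+1) 1 = [] :=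
        PySem.List.pyRange_one_eq_nil (by omega)
      rw [hrange]
      simp only [innerA]
      rw [if_neg (by omega : ¬ (0 : Int) < i)]
      rcases (by omega : PySem.Int.mod dir 4 = 0 ∨ PySem.Int.mod dir 4 = 1 ∨
          PySem.Int.mod dir 4 = 2 ∨ PySem.Int.mod dir 4 = 3) with h | h | h | h <;>
        rw [h] <;> norm_num <;>
        rw [ih _ _ _ _ _ hInv, mod4_succ, h] <;>
        try norm_num [PySem.Int.mod_eq_emod_of_pos (show (0:Int) < 4 by norm_num)]
    · have hi : 0 < i := by omega
      rw [if_pos hi]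
      rcases (by omega : PySem.Int.mod dir 4 = 0 ∨ PySem.Int.mod dir 4 = 1 ∨
          PySem.Int.mod dir 4 = 2 ∨ PySem.Int.mod dir 4 = 3) with h | h | h | h <;> rw [h]
      · have hst := step_equiv pos segs (fun j => (x, y + j)) (Seg.V x (y+1) (y+i)) i hInv hi
          (fun j1 j2 he => by simp only [Prod.ext_iff] at he; omega)
          (fun p => by
            cases p with
            | mk p1 p2 =>
              simp only [segMemB, Prod.mk.injEq, beq_iff_eq, Bool.and_eq_true, decide_eq_true_eq]
              constructor
              · rintro ⟨h0, h1, h2⟩; exact ⟨p2 - y, by omega, by omega, by omega⟩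
              · rintro ⟨j, h1, h2, he1, he2⟩; omega)
        show (match innerA (fun j => (x, y + j)) (PySem.List.pyRange 1 (i+1) 1) pos with
              | none => true
              | some pos' => goA rest pos' x (y + i) (dir + 1)) =
             (match (if segs.any (fun s => overlapB (Seg.V x (y+1) (y+i)) s) then none
                     else some (segs ++ [Seg.V x (y+1) (y+i)])) with
              | none => true
              | some segs' => goB rest segs' x (y + i) (PySem.Int.mod (0+1) 4))
        cases hin : innerA (fun j => (x, y + j)) (PySem.List.pyRange 1 (i+1) 1) pos with
        | none => rw [if_pos ((hst.1).mp hin)]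
        | some pos' =>
          have hany : ¬ (segs.any (fun s => overlapB (Seg.V x (y+1) (y+i)) s) = true) := by
            intro hc
            rw [← hst.1] at hc
            rw [hc] at hin
            cases hin
          rw [if_neg hany]
          show goA rest pos' x (y + i) (dir + 1) =
            goB rest (segs ++ [Seg.V x (y+1) (y+i)]) x (y + i) (PySem.Int.mod (0+1) 4)
          rw [ih _ _ _ _ _ (hst.2 pos' hin), mod4_succ, h]
      · have hst := step_equiv pos segs (fun j => (x + j, y)) (Seg.H y (x+1) (x+i)) i hInv hi
          (fun j1 j2 he => by simp only [Prod.ext_iff] at he; omega)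
          (fun p => by
            cases p with
            | mk p1 p2 =>
              simp only [segMemB, Prod.mk.injEq, beq_iff_eq, Bool.and_eq_true, decide_eq_true_eq]
              constructor
              · rintro ⟨h0, h1, h2⟩; exact ⟨p1 - x, by omega, by omega, by omega⟩
              · rintro ⟨j, h1, h2, he1, he2⟩; omega)
        show (match innerA (fun j => (x + j, y)) (PySem.List.pyRange 1 (i+1) 1) pos with
              | none => true
              | some pos' => goA rest pos' (x + i) y (dir + 1)) =
             (match (if segs.any (fun s => overlapB (Seg.H y (x+1) (x+i)) s) then none
                     else some (segs ++ [Seg.H y (x+1) (x+i)])) with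
              | none => true
              | some segs' => goB rest segs' (x + i) y (PySem.Int.mod (1+1) 4))
        cases hin : innerA (fun j => (x + j, y)) (PySem.List.pyRange 1 (i+1) 1) pos with
        | none => rw [if_pos ((hst.1).mp hin)]
        | some pos' =>
          have hany : ¬ (segs.any (fun s => overlapB (Seg.H y (x+1) (x+i)) s) = true) := by
            intro hc
            rw [← hst.1] at hc
            rw [hc] at hin
            cases hin
          rw [if_neg hany]
          show goA rest pos' (x + i) y (dir + 1) =
            goB rest (segs ++ [Seg.H y (x+1) (x+i)]) (x + i) y (PySem.Int.mod (1+1) 4)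
          rw [ih _ _ _ _ _ (hst.2 pos' hin), mod4_succ, h]
      · have hst := step_equiv pos segs (fun j => (x, y - j)) (Seg.V x (y-i) (y-1)) i hInv hi
          (fun j1 j2 he => by simp only [Prod.ext_iff] at he; omega)
          (fun p => by
            cases p with
            | mk p1 p2 =>
              simp only [segMemB, Prod.mk.injEq, beq_iff_eq, Bool.and_eq_true, decide_eq_true_eq]
              constructor
              · rintro ⟨h0, h1, h2⟩; exact ⟨y - p2, by omega, by omega, by omega⟩
              · rintro ⟨j, h1, h2, he1, he2⟩; omega)
        show (match innerA (fun j => (x, y - j)) (PySem.List.pyRange 1 (i+1) 1) pos with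
              | none => true
              | some pos' => goA rest pos' x (y - i) (dir + 1)) =
             (match (if segs.any (fun s => overlapB (Seg.V x (y-i) (y-1)) s) then none
                     else some (segs ++ [Seg.V x (y-i) (y-1)])) with
              | none => true
              | some segs' => goB rest segs' x (y - i) (PySem.Int.mod (2+1) 4))
        cases hin : innerA (fun j => (x, y - j)) (PySem.List.pyRange 1 (i+1) 1) pos with
        | none => rw [if_pos ((hst.1).mp hin)]
        | some pos' =>
          have hany : ¬ (segs.any (fun s => overlapB (Seg.V x (y-i) (y-1)) s) = true) := by
            intro hc
            rw [← hst.1] at hc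
            rw [hc] at hin
            cases hin
          rw [if_neg hany]
          show goA rest pos' x (y - i) (dir + 1) =
            goB rest (segs ++ [Seg.V x (y-i) (y-1)]) x (y - i) (PySem.Int.mod (2+1) 4)
          rw [ih _ _ _ _ _ (hst.2 pos' hin), mod4_succ, h]
      · have hst := step_equiv pos segs (fun j => (x - j, y)) (Seg.H y (x-i) (x-1)) i hInv hi
          (fun j1 j2 he => by simp only [Prod.ext_iff] at he; omega)
          (fun p => by
            cases p with
            | mk p1 p2 =>
              simp only [segMemB, Prod.mk.injEq, beq_iff_eq, Bool.and_eq_true, decide_eq_true_eq]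
              constructor
              · rintro ⟨h0, h1, h2⟩; exact ⟨x - p1, by omega, by omega, by omega⟩
              · rintro ⟨j, h1, h2, he1, he2⟩; omega)
        show (match innerA (fun j => (x - j, y)) (PySem.List.pyRange 1 (i+1) 1) pos with
              | none => true
              | some pos' => goA rest pos' (x - i) y (dir + 1)) =
             (match (if segs.any (fun s => overlapB (Seg.H y (x-i) (x-1)) s) then none
                     else some (segs ++ [Seg.H y (x-i) (x-1)])) with
              | none => true
              | some segs' => goB rest segs' (x - i) y (PySem.Int.mod (3+1) 4))
        cases hin : innerA (fun j => (x - j, y)) (PySem.List.pyRange 1 (i+1) 1) pos with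
        | none => rw [if_pos ((hst.1).mp hin)]
        | some pos' =>
          have hany : ¬ (segs.any (fun s => overlapB (Seg.H y (x-i) (x-1)) s) = true) := by
            intro hc
            rw [← hst.1] at hc
            rw [hc] at hin
            cases hin
          rw [if_neg hany]
          show goA rest pos' (x - i) y (dir + 1) =
            goB rest (segs ++ [Seg.H y (x-i) (x-1)]) (x - i) y (PySem.Int.mod (3+1) 4)
          rw [ih _ _ _ _ _ (hst.2 pos' hin), mod4_succ, h]
-- ===== VERDICT (by name: the statement is the Claim_ definition above) =====
theorem robotWalk_spec : Claim_equal_robotWalk := by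
  intro a _
  show robotWalk a = robotWalk_alt a
  unfold robotWalk robotWalk_alt
  have hInv : DictInv ((∅ : Std.HashMap (Int × Int) Bool).insert ((0 : Int), (0 : Int)) true) [Seg.V 0 0 0] := by
    intro p
    cases p with
    | mk p1 p2 =>
      rw [Std.HashMap.contains_insert, Bool.eq_iff_iff]
      simp [segMemB, Prod.ext_iff]
      omega
  rw [goA_eq_goB a _ [Seg.V 0 0 0] 0 0 0 hInv]
  norm_num [PySem.Int.mod_eq_emod_of_pos (show (0:Int) < 4 by norm_num)]
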